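-- pv_equiv track=rewrite | github.com/sushk2904/Innomatics-Resume-IQ | backend/app/services/resume_parser.py | get_highest_degree
-- ===== SOURCE A (Python) =====
-- from typing import Dict, List, Any, Optional
--
-- def get_highest_degree(degrees: List[str]) -> str:
--     """Determine the highest degree from a list of degrees"""
--
--     degree_hierarchy = {
--         'phd': 5, 'doctorate': 5, 'doctor': 5,
--         'master': 4, 'mba': 4, 'ms': 4, 'm.tech': 4, 'm.sc': 4,
--         'bachelor': 3, 'b.tech': 3, 'b.sc': 3, 'b.com': 3,
--         'diploma': 2,
--         'certificate': 1
--     }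
--
--     highest_level = 0
--     highest_degree = "Unknown"
--
--     for degree in degrees:
--         degree_lower = degree.lower().strip()
--         for key, level in degree_hierarchy.items():
--             if key in degree_lower and level > highest_level:
--                 highest_level = level
--                 highest_degree = degree.strip().title()
--
--     return highest_degree
-- ===== SOURCE B (Python) =====
-- def get_highest_degree(degrees):
--     """Determine the highest degree from a list of degrees"""
--     keys_by_level = {
--         5: ['phd', 'doctorate', 'doctor'],
--         4: ['master', 'mba', 'ms', 'm.tech', 'm.sc'],
--         3: ['bachelor', 'b.tech', 'b.sc', 'b.com'],
--         2: ['diploma'],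
--         1: ['certificate'],
--     }
--     for level in (5, 4, 3, 2, 1):
--         keys = keys_by_level[level]
--         for degree in degrees:
--             dl = degree.lower().strip()
--             if any(k in dl for k in keys):
--                 return degree.strip().title()
--     return "Unknown"
-- ===== Notes on version B (the rewrite author's own statement) =====
-- stated objective: alternative
-- what changed: Replaces A's degree-major scan with a (highest_level, highest_degree) accumulator by a level-major search: iterate levels 5 down to 1 and return the first degree matching a key of that level, with no accumulator at all.
import Mathlib
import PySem

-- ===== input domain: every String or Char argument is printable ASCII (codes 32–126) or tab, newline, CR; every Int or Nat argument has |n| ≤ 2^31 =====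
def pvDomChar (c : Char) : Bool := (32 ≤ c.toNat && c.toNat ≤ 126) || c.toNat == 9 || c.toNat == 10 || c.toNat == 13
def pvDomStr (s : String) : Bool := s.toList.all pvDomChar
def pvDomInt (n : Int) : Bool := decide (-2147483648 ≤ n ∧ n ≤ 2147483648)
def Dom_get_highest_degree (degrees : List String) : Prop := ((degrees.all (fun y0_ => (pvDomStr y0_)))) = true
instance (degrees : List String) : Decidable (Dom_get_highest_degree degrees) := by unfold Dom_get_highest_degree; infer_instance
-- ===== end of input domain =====

-- B replaces A's degree-major accumulator scan by a level-major search (levels 5 down to 1,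
-- return the first matching degree, no accumulator); same return value, objective: alternative.

-- ===== PORT A =====

-- the dict literal 'degree_hierarchy', in insertion order (keys as List Char)
def pvHierarchy : List (List Char × Nat) :=
  [("phd".toList, 5), ("doctorate".toList, 5), ("doctor".toList, 5),
   ("master".toList, 4), ("mba".toList, 4), ("ms".toList, 4), ("m.tech".toList, 4), ("m.sc".toList, 4),
   ("bachelor".toList, 3), ("b.tech".toList, 3), ("b.sc".toList, 3), ("b.com".toList, 3),
   ("diploma".toList, 2),
   ("certificate".toList, 1)]

-- str.title() for ASCII: a letter is uppercased after a non-letter, lowercased after a letter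
def pvTitleGo (prev : Bool) : List Char → List Char
  | [] => []
  | c :: cs =>
      (if PySem.Chars.isalpha c then
        (if prev then PySem.Chars.lowerChar c else PySem.Chars.upperChar c)
       else c) :: pvTitleGo (PySem.Chars.isalpha c) cs

def pvTitle (s : List Char) : List Char := pvTitleGo false s

-- the body of A's outer 'for degree in degrees' loop (state = (highest_level, highest_degree))
def pvStepA (st : Nat × String) (degree : String) : Nat × String :=
  let dl := PySem.Chars.strip (PySem.Chars.lower degree.toList)
  pvHierarchy.foldl
    (fun st2 kv =>
      if PySem.Chars.isIn kv.1 dl ∧ st2.1 < kv.2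
      then (kv.2, String.ofList (pvTitle (PySem.Chars.strip degree.toList)))
      else st2)
    st

def get_highest_degree (degrees : List String) : String :=
  (degrees.foldl pvStepA (0, "Unknown")).2

-- ===== PORT B =====

-- the dict literal 'keys_by_level' as a lookup by level (keys as List Char)
def pvKeysOf (lvl : Nat) : List (List Char) :=
  match lvl with
  | 5 => ["phd".toList, "doctorate".toList, "doctor".toList]
  | 4 => ["master".toList, "mba".toList, "ms".toList, "m.tech".toList, "m.sc".toList]
  | 3 => ["bachelor".toList, "b.tech".toList, "b.sc".toList, "b.com".toList]
  | 2 => ["diploma".toList]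
  | 1 => ["certificate".toList]
  | _ => []

-- 'any(k in dl for k in keys)' with dl = degree.lower().strip()
def pvMatch (lvl : Nat) (degree : String) : Bool :=
  (pvKeysOf lvl).any
    (fun k => PySem.Chars.isIn k (PySem.Chars.strip (PySem.Chars.lower degree.toList)))

-- 'for level in (5,4,3,2,1): for degree in degrees: if …: return degree.strip().title()'
def get_highest_degree_alt (degrees : List String) : String :=
  match ([5, 4, 3, 2, 1] : List Nat).findSome? (fun lvl =>
      degrees.findSome? (fun degree =>
        if pvMatch lvl degree
        then some (String.ofList (pvTitle (PySem.Chars.strip degree.toList)))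
        else none)) with
  | some s => s
  | none => "Unknown"

-- ===== PRECONDITION & SPEC =====
def Spec_get_highest_degree (degrees : List String) (out : String) : Prop := out = get_highest_degree_alt degrees
instance (degrees : List String) (out : String) : Decidable (Spec_get_highest_degree degrees out) := by unfold Spec_get_highest_degree; infer_instance

-- ===== CLAIM (what is proved, stated in full; the proofs are below) =====
def Claim_equal_get_highest_degree : Prop := ∀ (degrees : List String), Dom_get_highest_degree degrees → Spec_get_highest_degree degrees (get_highest_degree degrees)

-- ===== LEMMAS AND PROOFS =====

-- degree.strip().title()
def pvT (degree : String) : String := String.ofList (pvTitle (PySem.Chars.strip degree.toList))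

-- the level A's inner key-loop assigns to one degree, stated through B's per-level match
def pvLev (d : String) : Nat :=
  if pvMatch 5 d then 5 else if pvMatch 4 d then 4 else if pvMatch 3 d then 3
  else if pvMatch 2 d then 2 else if pvMatch 1 d then 1 else 0

-- max over a degree list of pvLev
def pvMxl (ds : List String) : Nat := ds.foldl (fun a d => max a (pvLev d)) 0

-- max level of a key of kvs occurring in dl
def pvM (kvs : List (List Char × Nat)) (dl : List Char) : Nat :=
  ((kvs.filter (fun kv => PySem.Chars.isIn kv.1 dl)).map (·.2)).foldl max 0

lemma pvFoldl_max_shift (l : List Nat) (a b : Nat) :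
    l.foldl max (max a b) = max a (l.foldl max b) := by
  induction l generalizing b with
  | nil => rfl
  | cons c t ih => simpa [List.foldl, Nat.max_assoc] using ih (max b c)

lemma pvM_cons (kv : List Char × Nat) (kvs : List (List Char × Nat)) (dl : List Char) :
    pvM (kv :: kvs) dl =
      if PySem.Chars.isIn kv.1 dl then max kv.2 (pvM kvs dl) else pvM kvs dl := by
  unfold pvM
  by_cases h : PySem.Chars.isIn kv.1 dl
  · simp only [h, List.filter_cons_of_pos, List.map_cons, List.foldl_cons, if_pos]
    have := pvFoldl_max_shift ((kvs.filter (fun kv => PySem.Chars.isIn kv.1 dl)).map (·.2)) kv.2 0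
    simpa [Nat.max_comm] using this
  · simp [h]

lemma pvM_append (l1 l2 : List (List Char × Nat)) (dl : List Char) :
    pvM (l1 ++ l2) dl = max (pvM l1 dl) (pvM l2 dl) := by
  induction l1 with
  | nil => simp [pvM]
  | cons kv t ih =>
      rw [List.cons_append, pvM_cons, pvM_cons, ih]
      by_cases h : PySem.Chars.isIn kv.1 dl <;> simp [h, Nat.max_assoc]

lemma pvM_uniform (keys : List (List Char)) (L : Nat) (dl : List Char) :
    pvM (keys.map (fun k => (k, L))) dl =
      if keys.any (fun k => PySem.Chars.isIn k dl) then L else 0 := by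
  induction keys with
  | nil => simp [pvM]
  | cons k t ih =>
      rw [List.map_cons, pvM_cons, ih]
      by_cases h : PySem.Chars.isIn k dl
      · simp only [List.any_cons, h, Bool.true_or, if_pos]
        by_cases h2 : t.any (fun k => PySem.Chars.isIn k dl) <;> simp [h2]
      · simp [h]

lemma pvHierarchy_groups :
    pvHierarchy =
      (pvKeysOf 5).map (fun k => (k, 5)) ++ (pvKeysOf 4).map (fun k => (k, 4)) ++
      (pvKeysOf 3).map (fun k => (k, 3)) ++ (pvKeysOf 2).map (fun k => (k, 2)) ++
      (pvKeysOf 1).map (fun k => (k, 1)) := by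
  rfl

-- pvM over the hierarchy is pvLev
lemma pvM_hier (d : String) :
    pvM pvHierarchy (PySem.Chars.strip (PySem.Chars.lower d.toList)) = pvLev d := by
  rw [pvHierarchy_groups]
  simp only [pvM_append, pvM_uniform]
  unfold pvLev pvMatch
  by_cases h5 : (pvKeysOf 5).any (fun k => PySem.Chars.isIn k (PySem.Chars.strip (PySem.Chars.lower d.toList))) <;>
  by_cases h4 : (pvKeysOf 4).any (fun k => PySem.Chars.isIn k (PySem.Chars.strip (PySem.Chars.lower d.toList))) <;>
  by_cases h3 : (pvKeysOf 3).any (fun k => PySem.Chars.isIn k (PySem.Chars.strip (PySem.Chars.lower d.toList))) <;>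
  by_cases h2 : (pvKeysOf 2).any (fun k => PySem.Chars.isIn k (PySem.Chars.strip (PySem.Chars.lower d.toList))) <;>
  by_cases h1 : (pvKeysOf 1).any (fun k => PySem.Chars.isIn k (PySem.Chars.strip (PySem.Chars.lower d.toList))) <;>
  simp [h5, h4, h3, h2, h1]

lemma pvInnerFold (kvs : List (List Char × Nat)) (dl : List Char) (name : String)
    (h : Nat) (n : String) :
    kvs.foldl
      (fun st2 kv => if PySem.Chars.isIn kv.1 dl ∧ st2.1 < kv.2 then (kv.2, name) else st2)
      (h, n)
    = (max h (pvM kvs dl), if h < pvM kvs dl then name else n) := by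
  induction kvs generalizing h n with
  | nil =>
      simp [pvM]
  | cons kv kvs ih =>
      rw [List.foldl_cons, pvM_cons]
      by_cases hin : PySem.Chars.isIn kv.1 dl
      · by_cases hlt : h < kv.2
        · rw [if_pos ⟨hin, hlt⟩, ih, if_pos hin]
          have h1 : max h (max kv.2 (pvM kvs dl)) = max kv.2 (pvM kvs dl) := by omega
          have h2 : h < max kv.2 (pvM kvs dl) := by omega
          rw [h1, if_pos h2]
          by_cases hm : kv.2 < pvM kvs dl <;> simp [hm]
        · rw [if_neg (by simp [hlt]), ih, if_pos hin]
          have h1 : max h (max kv.2 (pvM kvs dl)) = max h (pvM kvs dl) := by omega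
          have h2 : (h < max kv.2 (pvM kvs dl)) ↔ (h < pvM kvs dl) := by omega
          rw [h1]
          by_cases hm : h < pvM kvs dl
          · rw [if_pos hm, if_pos (h2.mpr hm)]
          · rw [if_neg hm, if_neg (fun hc => hm (h2.mp hc))]
      · rw [if_neg (fun hc => hin hc.1), ih, if_neg hin]

lemma pvStepA_eq (st : Nat × String) (degree : String) :
    pvStepA st degree =
      (max st.1 (pvLev degree),
       if st.1 < pvLev degree then pvT degree else st.2) := by
  obtain ⟨h, n⟩ := st
  unfold pvStepA pvT
  rw [pvInnerFold, pvM_hier]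

lemma pvFoldl_maxlev_shift (t : List String) (a : Nat) :
    t.foldl (fun a d => max a (pvLev d)) a = max a (pvMxl t) := by
  induction t generalizing a with
  | nil => simp [pvMxl]
  | cons d t ih =>
      unfold pvMxl
      simp only [List.foldl_cons]
      rw [ih (max a (pvLev d)), ih (max 0 (pvLev d))]
      omega

lemma pvMxl_cons (d : String) (t : List String) :
    pvMxl (d :: t) = max (pvLev d) (pvMxl t) := by
  unfold pvMxl
  rw [List.foldl_cons, pvFoldl_maxlev_shift,
      show pvMxl t = t.foldl (fun a d => max a (pvLev d)) 0 from rfl]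
  omega

-- the find? at the max level succeeds
lemma pvFind_some (ds : List String) (h1 : 1 ≤ pvMxl ds) :
    (ds.find? (fun d => pvMxl ds ≤ pvLev d)).isSome := by
  rw [List.find?_isSome]
  induction ds with
  | nil => simp [pvMxl] at h1
  | cons d t ih =>
      have hc := pvMxl_cons d t
      by_cases hd : pvMxl (d :: t) ≤ pvLev d
      · exact ⟨d, List.mem_cons_self, by simpa using hd⟩
      · have ht : pvMxl (d :: t) = pvMxl t := by omega
        have h1t : 1 ≤ pvMxl t := by omega
        obtain ⟨x, hx, hpx⟩ := ih h1t
        exact ⟨x, List.mem_cons_of_mem _ hx, by rw [ht]; exact hpx⟩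

-- A's fold, characterized: final level is max, final name is the first degree attaining it
lemma pvA_fold (ds : List String) : ∀ (h : Nat) (n : String),
    ds.foldl pvStepA (h, n) =
      (max h (pvMxl ds),
       if h < pvMxl ds
       then ((ds.find? (fun d => pvMxl ds ≤ pvLev d)).map pvT).getD n
       else n) := by
  induction ds with
  | nil => intro h n; simp [pvMxl]
  | cons d t ih =>
      intro h n
      rw [List.foldl_cons, pvStepA_eq, ih, pvMxl_cons]
      by_cases hd : pvMxl t ≤ pvLev d
      · have hmx : max (pvLev d) (pvMxl t) = pvLev d := by omega
        rw [hmx]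
        have hfind : (d :: t).find? (fun x => pvLev d ≤ pvLev x) = some d := by
          rw [List.find?_cons_of_pos]; simp
        rw [hfind]
        have e1 : max (max h (pvLev d)) (pvMxl t) = max h (pvLev d) := by omega
        have e2 : ¬ max h (pvLev d) < pvMxl t := by omega
        rw [e1, if_neg e2]
        simp
      · have hmx : max (pvLev d) (pvMxl t) = pvMxl t := by omega
        rw [hmx]
        have hfind : (d :: t).find? (fun x => pvMxl t ≤ pvLev x) = t.find? (fun x => pvMxl t ≤ pvLev x) := by
          rw [List.find?_cons_of_neg]; simp; omega
        rw [hfind]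
        have e1 : max (max h (pvLev d)) (pvMxl t) = max h (pvMxl t) := by omega
        by_cases hlt : h < pvMxl t
        · have e2 : max h (pvLev d) < pvMxl t := by omega
          rw [e1, if_pos e2, if_pos hlt]
          obtain ⟨w, hw⟩ := Option.isSome_iff_exists.mp (pvFind_some t (by omega))
          rw [hw]
          simp
        · have e2 : ¬ max h (pvLev d) < pvMxl t := by omega
          have e3 : ¬ h < pvLev d := by omega
          rw [e1, if_neg e2, if_neg hlt, if_neg e3]

-- pvMatch at levels outside 1..5 is false
lemma pvMatch_out (lvl : Nat) (d : String) (h5 : 5 < lvl) : pvMatch lvl d = false := by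
  unfold pvMatch pvKeysOf
  match lvl, h5 with
  | n + 6, _ => simp

lemma pvMatch_le_lev (lvl : Nat) (d : String) (h : pvMatch lvl d = true) : lvl ≤ pvLev d := by
  by_cases h5 : 5 < lvl
  · rw [pvMatch_out lvl d h5] at h; exact absurd h (by simp)
  · unfold pvLev
    interval_cases lvl <;> simp_all [pvMatch, pvKeysOf] <;> split_ifs <;> omega

lemma pvLev_match (d : String) (h : 1 ≤ pvLev d) : pvMatch (pvLev d) d = true := by
  unfold pvLev at *
  split_ifs at * <;> simp_all

lemma pvLev_le_five (d : String) : pvLev d ≤ 5 := by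
  unfold pvLev; split_ifs <;> omega

lemma pvMem_le_mxl (ds : List String) (d : String) (h : d ∈ ds) : pvLev d ≤ pvMxl ds := by
  induction ds with
  | nil => cases h
  | cons x t ih =>
      rw [pvMxl_cons]
      cases h with
      | head => omega
      | tail _ h => have := ih h; omega

lemma pvMxl_le_five (ds : List String) : pvMxl ds ≤ 5 := by
  induction ds with
  | nil => simp [pvMxl]
  | cons d t ih => rw [pvMxl_cons]; have := pvLev_le_five d; omega

lemma pvFind?_congr_mem {α : Type} (p q : α → Bool) (l : List α)
    (h : ∀ x ∈ l, p x = q x) : l.find? p = l.find? q := by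
  induction l with
  | nil => rfl
  | cons x t ih =>
      have hx := h x (List.mem_cons_self)
      by_cases hp : p x = true
      · rw [List.find?_cons_of_pos hp, List.find?_cons_of_pos (hx ▸ hp)]
      · rw [List.find?_cons_of_neg (by simpa using hp),
            List.find?_cons_of_neg (by simp [← hx]; simpa using hp)]
        exact ih (fun x hx2 => h x (List.mem_cons_of_mem _ hx2))

lemma pvFindSome?_if (ds : List String) (lvl : Nat) :
    ds.findSome? (fun degree =>
        if pvMatch lvl degree
        then some (String.ofList (pvTitle (PySem.Chars.strip degree.toList)))
        else none)
      = (ds.find? (pvMatch lvl)).map pvT := by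
  induction ds with
  | nil => rfl
  | cons d t ih =>
      by_cases h : pvMatch lvl d
      · rw [List.findSome?_cons, List.find?_cons_of_pos h]
        simp [h, pvT]
      · rw [List.findSome?_cons, List.find?_cons_of_neg (by simpa using h)]
        simp [h, ih]

-- find? at a level above the max is none
lemma pvFind_none (ds : List String) (lvl : Nat) (h : pvMxl ds < lvl) :
    ds.find? (pvMatch lvl) = none := by
  rw [List.find?_eq_none]
  intro d hd hm
  have := pvMatch_le_lev lvl d hm
  have := pvMem_le_mxl ds d hd
  omega

-- find? at the max level is find? of 'attains the max'
lemma pvFind_at_max (ds : List String) (h1 : 1 ≤ pvMxl ds) :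
    ds.find? (pvMatch (pvMxl ds)) = ds.find? (fun d => pvMxl ds ≤ pvLev d) := by
  apply pvFind?_congr_mem
  intro d hd
  have hle := pvMem_le_mxl ds d hd
  by_cases hm : pvMatch (pvMxl ds) d = true
  · have := pvMatch_le_lev _ _ hm
    simp [hm]; omega
  · simp only [Bool.not_eq_true] at hm
    rw [hm]
    by_cases hlev : pvMxl ds ≤ pvLev d
    · have heq : pvLev d = pvMxl ds := by omega
      have := pvLev_match d (by omega)
      rw [heq] at this
      exact absurd this (by simp [hm])
    · simp [hlev]

-- B, characterized the same way
lemma pvB_eq (ds : List String) :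
    get_highest_degree_alt ds =
      (if 0 < pvMxl ds
       then ((ds.find? (fun d => pvMxl ds ≤ pvLev d)).map pvT).getD "Unknown"
       else "Unknown") := by
  unfold get_highest_degree_alt
  simp only [List.findSome?_cons, pvFindSome?_if]
  have h5 := pvMxl_le_five ds
  by_cases h0 : pvMxl ds = 0
  · have n5 := pvFind_none ds 5 (by omega)
    have n4 := pvFind_none ds 4 (by omega)
    have n3 := pvFind_none ds 3 (by omega)
    have n2 := pvFind_none ds 2 (by omega)
    have n1 := pvFind_none ds 1 (by omega)
    simp [n5, n4, n3, n2, n1, h0]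
  · have h1 : 1 ≤ pvMxl ds := by omega
    have hs := pvFind_some ds h1
    obtain ⟨w, hw⟩ := Option.isSome_iff_exists.mp hs
    have hfm := pvFind_at_max ds h1
    rcases (show pvMxl ds = 1 ∨ pvMxl ds = 2 ∨ pvMxl ds = 3 ∨ pvMxl ds = 4 ∨ pvMxl ds = 5 by omega)
      with hL | hL | hL | hL | hL <;> rw [hL] at hfm hw ⊢
    · simp [pvFind_none ds 5 (by omega), pvFind_none ds 4 (by omega),
            pvFind_none ds 3 (by omega), pvFind_none ds 2 (by omega), hfm, hw]
    · simp [pvFind_none ds 5 (by omega), pvFind_none ds 4 (by omega),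
            pvFind_none ds 3 (by omega), hfm, hw]
    · simp [pvFind_none ds 5 (by omega), pvFind_none ds 4 (by omega), hfm, hw]
    · simp [pvFind_none ds 5 (by omega), hfm, hw]
    · simp [hfm, hw]

-- ===== VERDICT (by name: the statement is the Claim_ definition above) =====
theorem get_highest_degree_spec : Claim_equal_get_highest_degree := by
  intro ds _
  unfold Spec_get_highest_degree get_highest_degree
  rw [pvA_fold, pvB_eq]
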